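-- pv_equiv track=rewrite | github.com/Revanththetalogics/aireume | app/backend/routes/analyze.py | _estimate_skill_proficiency
-- ===== SOURCE A (Python) =====
-- PROFICIENCY_CUE_MAP: dict[str, list[str]] = {
--     "expert": [
--         "expert in", "deep knowledge of", "mastery of",
--         "extensive experience with", "8+ years", "10+ years",
--         "expert-level", "deep expertise",
--     ],
--     "advanced": [
--         "proficient in", "solid experience", "strong knowledge",
--         "strong background", "5+ years", "6+ years", "7+ years",
--         "proven track record with", "advanced knowledge",
--         "hands-on experience",
--     ],
--     "intermediate": [
--         "working knowledge of", "experience with", "good understanding",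
--         "2+ years", "3+ years", "4+ years", "comfortable with",
--     ],
--     "basic": [
--         "basic understanding of", "exposure to", "awareness of",
--         "familiarity with", "knowledge of", "1+ year",
--         "some experience",
--     ],
-- }
--
-- _PROFICIENCY_RANK = {"basic": 0, "intermediate": 1, "advanced": 2, "expert": 3}
--
-- _SENIORITY_DEFAULT_PROFICIENCY: dict[str, str] = {
--     "junior": "basic",
--     "mid": "intermediate",
--     "senior": "advanced",
--     "lead": "expert",
--     "principal": "expert",
-- }
--
-- def _estimate_skill_proficiency(
--     skill: str,
--     seniority: str,
--     jd_text: str,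
--     is_nice_to_have: bool = False,
-- ) -> str:
--     """Estimate the expected proficiency level for a skill based on
--     linguistic cues in the JD text and the role's seniority.
--
--     Priority order:
--       1. Cue-based detection (±150 chars around skill mention)
--       2. Seniority-based default
--       3. Nice-to-have cap (one level below seniority default)
--
--     Returns one of: "basic", "intermediate", "advanced", "expert".
--     """
--     jd_lower = jd_text.lower()
--     skill_lower = skill.lower()
--     pos = jd_lower.find(skill_lower)
--
--     # --- Step 1: Try cue-based detection around the skill mention ---
--     if pos >= 0:
--         ctx_start = max(0, pos - 150)
--         ctx_end = min(len(jd_text), pos + len(skill_lower) + 150)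
--         context = jd_lower[ctx_start:ctx_end]
--
--         for level in ("expert", "advanced", "intermediate", "basic"):
--             if any(cue in context for cue in PROFICIENCY_CUE_MAP[level]):
--                 proficiency = level
--                 break
--         else:
--             proficiency = None
--     else:
--         proficiency = None
--
--     # --- Step 2: Fall back to seniority-based default ---
--     if proficiency is None:
--         proficiency = _SENIORITY_DEFAULT_PROFICIENCY.get(seniority.lower(), "intermediate")
--
--     # --- Step 3: Nice-to-have cap — one level below seniority default ---
--     if is_nice_to_have:
--         seniority_default = _SENIORITY_DEFAULT_PROFICIENCY.get(
--             seniority.lower(), "intermediate"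
--         )
--         cap_rank = max(_PROFICIENCY_RANK[seniority_default] - 1, 0)
--         if _PROFICIENCY_RANK[proficiency] > cap_rank:
--             proficiency = [k for k, v in _PROFICIENCY_RANK.items() if v == cap_rank][0]
--
--     return proficiency
-- ===== SOURCE B (Python) =====
-- # B: text-driven matcher. Instead of running a substring search ("cue in context")
-- # for every cue of every level, B sweeps the context positions once and, at each
-- # offset, asks which cue phrases start there (startswith), keeping the highest
-- # rank seen; seniority default and nice-to-have cap are pure rank arithmetic.
--
-- _LEVELS = ["basic", "intermediate", "advanced", "expert"]
--
-- _CUE_RANK = {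
--     "expert in": 3, "deep knowledge of": 3, "mastery of": 3,
--     "extensive experience with": 3, "8+ years": 3, "10+ years": 3,
--     "expert-level": 3, "deep expertise": 3,
--     "proficient in": 2, "solid experience": 2, "strong knowledge": 2,
--     "strong background": 2, "5+ years": 2, "6+ years": 2, "7+ years": 2,
--     "proven track record with": 2, "advanced knowledge": 2,
--     "hands-on experience": 2,
--     "working knowledge of": 1, "experience with": 1, "good understanding": 1,
--     "2+ years": 1, "3+ years": 1, "4+ years": 1, "comfortable with": 1,
--     "basic understanding of": 0, "exposure to": 0, "awareness of": 0,
--     "familiarity with": 0, "knowledge of": 0, "1+ year": 0,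
--     "some experience": 0,
-- }
--
-- _SENIORITY_RANK = {"junior": 0, "mid": 1, "senior": 2, "lead": 3, "principal": 3}
--
--
-- def _estimate_skill_proficiency(skill, seniority, jd_text, is_nice_to_have=False):
--     jd_lower = jd_text.lower()
--     skill_lower = skill.lower()
--     pos = jd_lower.find(skill_lower)
--
--     best = -1
--     if pos >= 0:
--         context = jd_lower[max(0, pos - 150): pos + len(skill_lower) + 150]
--         for i in range(len(context)):
--             tail = context[i:]
--             for cue, r in _CUE_RANK.items():
--                 if r > best and tail.startswith(cue):
--                     best = r
--
--     sen_rank = _SENIORITY_RANK.get(seniority.lower(), 1)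
--     rank = best if best >= 0 else sen_rank
--     if is_nice_to_have:
--         rank = min(rank, max(sen_rank - 1, 0))
--     return _LEVELS[rank]
-- ===== Notes on version B (the rewrite author's own statement) =====
-- stated objective: alternative
-- what changed: A runs a substring-containment search (cue in context) for every cue of every level with an ordered short-circuit over levels; B instead sweeps the context text position by position once, testing at each offset which cue phrases start there (a hand-rolled multi-pattern matcher via startswith), accumulating the maximum rank, and replaces the string-level pipeline (seniority default dict, rank dict, list-comprehension inverse lookup) by pure integer rank arithmetic indexed back into a level list.
import Mathlib
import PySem

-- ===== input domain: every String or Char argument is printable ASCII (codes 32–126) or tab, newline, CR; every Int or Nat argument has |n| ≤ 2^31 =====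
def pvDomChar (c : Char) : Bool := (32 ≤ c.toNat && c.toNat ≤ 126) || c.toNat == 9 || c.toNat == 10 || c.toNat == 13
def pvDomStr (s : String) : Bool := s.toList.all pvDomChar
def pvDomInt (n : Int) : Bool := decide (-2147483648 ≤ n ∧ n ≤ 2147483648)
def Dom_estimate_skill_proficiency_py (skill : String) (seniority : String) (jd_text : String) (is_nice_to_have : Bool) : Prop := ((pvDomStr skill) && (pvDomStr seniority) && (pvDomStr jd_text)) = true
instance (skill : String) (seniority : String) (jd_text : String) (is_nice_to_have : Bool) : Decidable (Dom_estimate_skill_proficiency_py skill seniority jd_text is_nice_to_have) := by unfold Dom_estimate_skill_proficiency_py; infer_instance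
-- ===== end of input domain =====

-- B replaces A's per-cue substring-containment scans (ordered level lists, short-circuit)
-- by a single position sweep of the context testing with startswith which cues begin at
-- each offset (max rank accumulator), plus integer rank arithmetic (objective: alternative).

-- ===== PORT A =====
def pvCueMapA : PySem.Dict String (List String) := PySem.Dict.mk [
  ("expert", ["expert in", "deep knowledge of", "mastery of",
    "extensive experience with", "8+ years", "10+ years",
    "expert-level", "deep expertise"]),
  ("advanced", ["proficient in", "solid experience", "strong knowledge",
    "strong background", "5+ years", "6+ years", "7+ years",
    "proven track record with", "advanced knowledge",
    "hands-on experience"]),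
  ("intermediate", ["working knowledge of", "experience with", "good understanding",
    "2+ years", "3+ years", "4+ years", "comfortable with"]),
  ("basic", ["basic understanding of", "exposure to", "awareness of",
    "familiarity with", "knowledge of", "1+ year",
    "some experience"])]

def pvRankA : PySem.Dict String Int :=
  PySem.Dict.mk [("basic", 0), ("intermediate", 1), ("advanced", 2), ("expert", 3)]

def pvSenDefaultA : PySem.Dict String String :=
  PySem.Dict.mk [("junior", "basic"), ("mid", "intermediate"), ("senior", "advanced"),
                 ("lead", "expert"), ("principal", "expert")]

-- the `for level in (...): if any(...): break / else:` loop of A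
def pvFirstLevelA (context : String) : List String → Option String
  | [] => none
  | lvl :: rest =>
    if ((pvCueMapA.get? lvl).getD []).any (fun cue => PySem.Str.isIn cue context)
    then some lvl else pvFirstLevelA context rest

def estimate_skill_proficiency_py (skill : String) (seniority : String) (jd_text : String) (is_nice_to_have : Bool) : String :=
  let jd_lower := PySem.Str.lower jd_text
  let skill_lower := PySem.Str.lower skill
  let pos := PySem.Str.find jd_lower skill_lower
  let prof0 : Option String :=
    if 0 ≤ pos then
      let ctx_start : Int := max 0 (pos - 150)
      let ctx_end : Int := min (PySem.Str.len jd_text) (pos + PySem.Str.len skill_lower + 150)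
      let context := PySem.Str.slice jd_lower (some ctx_start) (some ctx_end)
      pvFirstLevelA context ["expert", "advanced", "intermediate", "basic"]
    else none
  let proficiency :=
    match prof0 with
    | none => pvSenDefaultA.getD (PySem.Str.lower seniority) "intermediate"
    | some p => p
  if is_nice_to_have then
    let seniority_default := pvSenDefaultA.getD (PySem.Str.lower seniority) "intermediate"
    -- `_PROFICIENCY_RANK[...]` never misses its key here, so `getD` with a dummy default is exact
    let cap_rank : Int := max (pvRankA.getD seniority_default 0 - 1) 0
    if pvRankA.getD proficiency 0 > cap_rank then
      -- `[k for k, v in _PROFICIENCY_RANK.items() if v == cap_rank][0]`; list never empty (cap_rank ∈ {0,1,2})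
      ((pvRankA.items.filter (fun p => p.2 == cap_rank)).map Prod.fst).headD proficiency
    else proficiency
  else proficiency

-- ===== PORT B =====
def pvLevelsB : List String := ["basic", "intermediate", "advanced", "expert"]

def pvCueRankB : PySem.Dict String Int := PySem.Dict.mk [
  ("expert in", 3), ("deep knowledge of", 3), ("mastery of", 3),
  ("extensive experience with", 3), ("8+ years", 3), ("10+ years", 3),
  ("expert-level", 3), ("deep expertise", 3),
  ("proficient in", 2), ("solid experience", 2), ("strong knowledge", 2),
  ("strong background", 2), ("5+ years", 2), ("6+ years", 2), ("7+ years", 2),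
  ("proven track record with", 2), ("advanced knowledge", 2),
  ("hands-on experience", 2),
  ("working knowledge of", 1), ("experience with", 1), ("good understanding", 1),
  ("2+ years", 1), ("3+ years", 1), ("4+ years", 1), ("comfortable with", 1),
  ("basic understanding of", 0), ("exposure to", 0), ("awareness of", 0),
  ("familiarity with", 0), ("knowledge of", 0), ("1+ year", 0),
  ("some experience", 0)]

def pvSenRankB : PySem.Dict String Int :=
  PySem.Dict.mk [("junior", 0), ("mid", 1), ("senior", 2), ("lead", 3), ("principal", 3)]

def estimate_skill_proficiency_py_alt (skill : String) (seniority : String) (jd_text : String) (is_nice_to_have : Bool) : String :=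
  let jd_lower := PySem.Str.lower jd_text
  let skill_lower := PySem.Str.lower skill
  let pos := PySem.Str.find jd_lower skill_lower
  let best : Int :=
    if 0 ≤ pos then
      let context := PySem.Str.slice jd_lower (some (max 0 (pos - 150)))
        (some (pos + PySem.Str.len skill_lower + 150))
      -- `for i in range(len(context)): tail = context[i:]; for cue, r in _CUE_RANK.items(): …`
      (PySem.List.pyRange 0 (PySem.Str.len context) 1).foldl
        (fun best i =>
          let tail := PySem.Str.slice context (some i) none
          pvCueRankB.items.foldl
            (fun b p => if b < p.2 && PySem.Str.startswith tail p.1 then p.2 else b) best)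
        (-1)
    else -1
  let sen_rank := pvSenRankB.getD (PySem.Str.lower seniority) 1
  let rank := if 0 ≤ best then best else sen_rank
  let rank := if is_nice_to_have then min rank (max (sen_rank - 1) 0) else rank
  -- `_LEVELS[rank]`: rank ∈ {0,1,2,3}, never out of range
  (PySem.List.pyGet? pvLevelsB rank).getD ""

-- ===== PRECONDITION & SPEC =====
def Spec_estimate_skill_proficiency_py (skill : String) (seniority : String) (jd_text : String) (is_nice_to_have : Bool) (out : String) : Prop := out = estimate_skill_proficiency_py_alt skill seniority jd_text is_nice_to_have
instance (skill : String) (seniority : String) (jd_text : String) (is_nice_to_have : Bool) (out : String) : Decidable (Spec_estimate_skill_proficiency_py skill seniority jd_text is_nice_to_have out) := by unfold Spec_estimate_skill_proficiency_py; infer_instance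

-- ===== CLAIM (what is proved, stated in full; the proofs are below) =====
def Claim_equal_estimate_skill_proficiency_py : Prop := ∀ (skill : String) (seniority : String) (jd_text : String) (is_nice_to_have : Bool), Dom_estimate_skill_proficiency_py skill seniority jd_text is_nice_to_have → Spec_estimate_skill_proficiency_py skill seniority jd_text is_nice_to_have (estimate_skill_proficiency_py skill seniority jd_text is_nice_to_have)

-- ===== LEMMAS AND PROOFS =====

-- B's accumulator in max-normal form
def pvF (T : List (String × Int)) (h : String × Int → Bool) (b : Int) : Int :=
  T.foldl (fun b p => if h p then max b p.2 else b) b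

-- B's guarded update `if b < r and hit then r else b` is the guarded max
theorem pvGuard (h : String × Int → Bool) (T : List (String × Int)) (b0 : Int) :
    T.foldl (fun b p => if b < p.2 && h p then p.2 else b) b0 = pvF T h b0 := by
  induction T generalizing b0 with
  | nil => rfl
  | cons p rest ih =>
    simp only [pvF, List.foldl_cons] at *
    have : (if b0 < p.2 && h p then p.2 else b0) = (if h p then max b0 p.2 else b0) := by
      by_cases hh : h p = true <;> simp [hh] <;> omega
    rw [this, ih]

theorem pvF_max (T : List (String × Int)) (h : String × Int → Bool) (x y : Int) :
    pvF T h (max x y) = max x (pvF T h y) := by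
  induction T generalizing x y with
  | nil => rfl
  | cons p rest ih =>
    simp only [pvF, List.foldl_cons] at *
    have : (if h p then max (max x y) p.2 else max x y)
        = max x (if h p then max y p.2 else y) := by
      by_cases hh : h p = true <;> simp [hh] <;> omega
    rw [this, ih]

theorem pvF_norm (T : List (String × Int)) (h : String × Int → Bool) (b : Int) (hb : -1 ≤ b) :
    pvF T h b = max b (pvF T h (-1)) := by
  have := pvF_max T h b (-1)
  rwa [max_eq_left hb] at this

theorem pvF_false (T : List (String × Int)) (b : Int) :
    pvF T (fun _ => false) b = b := by
  induction T with
  | nil => rfl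
  | cons p rest ih => simpa [pvF, List.foldl_cons] using ih

-- the max rank of a disjunction of hit predicates is the max of the two max ranks
theorem pvF_or (T : List (String × Int)) (h1 h2 : String × Int → Bool) :
    pvF T (fun p => h1 p || h2 p) (-1) = max (pvF T h1 (-1)) (pvF T h2 (-1)) := by
  induction T with
  | nil => simp [pvF]
  | cons p rest ih =>
    have e : ∀ (h : String × Int → Bool),
        pvF (p :: rest) h (-1) = max (if h p then max (-1) p.2 else -1) (pvF rest h (-1)) := by
      intro h
      simp only [pvF, List.foldl_cons]
      rw [show rest.foldl (fun b q => if h q then max b q.2 else b)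
            (if h p then max (-1) p.2 else -1) = pvF rest h (if h p then max (-1) p.2 else -1) from rfl,
        pvF_norm rest h _ (by by_cases hh : h p = true <;> simp [hh] <;> omega)]
      rfl
    rw [e, e, e, ih]
    by_cases h1p : h1 p = true <;> by_cases h2p : h2 p = true <;> simp [h1p, h2p] <;> omega

-- swapping B's loops: the position sweep of cue-table folds equals one table fold with
-- an any-position hit test per cue
theorem pvOuter (I : List Int) (g : Int → String × Int → Bool) (T : List (String × Int))
    (b : Int) (hb : -1 ≤ b) :
    I.foldl (fun b i => pvF T (g i) b) b = pvF T (fun p => I.any (fun i => g i p)) b := by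
  induction I generalizing b with
  | nil => simp only [List.foldl_nil, List.any_nil]; exact (pvF_false T b).symm
  | cons i I ih =>
    have hb' : -1 ≤ pvF T (g i) b := by
      rw [pvF_norm T _ b hb]; omega
    rw [List.foldl_cons, ih _ hb', pvF_norm T _ _ hb', pvF_norm T (g i) b hb, max_assoc,
      ← pvF_or, show (fun p => g i p || I.any (fun i => g i p))
        = (fun p => (i :: I).any (fun i => g i p)) from by funext p; simp,
      ← pvF_norm T _ b hb]

-- at-some-position startswith over the whole context is substring containment
theorem pvAnyPos (cue ctx : String) (hc : cue.toList ≠ []) :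
    ((PySem.List.pyRange 0 (PySem.Str.len ctx) 1).any
      (fun i => PySem.Str.startswith (PySem.Str.slice ctx (some i) none) cue))
    = PySem.Str.isIn cue ctx := by
  rw [Bool.eq_iff_iff]
  simp only [List.any_eq_true, PySem.List.mem_pyRange_one]
  constructor
  · rintro ⟨i, ⟨hi0, _⟩, hsw⟩
    rw [PySem.Str.startswith_eq] at hsw
    rw [PySem.Str.toList_slice, PySem.Chars.slice_eq_listSlice,
      PySem.List.slice_from _ hi0] at hsw
    rw [PySem.Str.isIn_eq, ← PySem.Chars.exists_prefix_drop_iff_isIn]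
    exact ⟨i.toNat, (PySem.Chars.startswith_iff _ _).mp hsw⟩
  · intro hin
    rw [PySem.Str.isIn_eq, ← PySem.Chars.exists_prefix_drop_iff_isIn] at hin
    obtain ⟨j, hj⟩ := hin
    have hjlt : j < ctx.toList.length := by
      by_contra hge
      rw [List.drop_eq_nil_of_le (Nat.le_of_not_lt hge)] at hj
      exact hc (List.prefix_nil.mp hj)
    refine ⟨(j : Int), ⟨Int.natCast_nonneg j, ?_⟩, ?_⟩
    · rw [PySem.Str.len_eq]; exact_mod_cast hjlt
    · rw [PySem.Str.startswith_eq, PySem.Str.toList_slice, PySem.Chars.slice_eq_listSlice,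
        PySem.List.slice_from _ (Int.natCast_nonneg j)]
      simp only [Int.toNat_natCast]
      exact (PySem.Chars.startswith_iff _ _).mpr hj

-- a constant-rank segment of the table contributes `max b0 r` iff one of its cues occurs
theorem pvFoldSeg (f : String → Bool) (cs : List String) (r b0 : Int) :
    (cs.map (fun c => (c, r))).foldl (fun b p => if f p.1 then max b p.2 else b) b0
      = if cs.any f then max b0 r else b0 := by
  induction cs generalizing b0 with
  | nil => simp
  | cons c rest ih =>
    by_cases h : f c = true
    · simp only [List.map_cons, List.foldl_cons, List.any_cons, h, Bool.true_or, if_true, ih]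
      by_cases hr : rest.any f = true <;> simp [hr] <;> omega
    · simp [h, ih]

theorem pvBest (f : String → Bool) :
    pvF pvCueRankB.items (fun p => f p.1) (-1)
      = (if ((pvCueMapA.get? "expert").getD []).any f then (3 : Int)
         else if ((pvCueMapA.get? "advanced").getD []).any f then 2
         else if ((pvCueMapA.get? "intermediate").getD []).any f then 1
         else if ((pvCueMapA.get? "basic").getD []).any f then 0
         else -1) := by
  have h : pvCueRankB.items
      = (((pvCueMapA.get? "expert").getD []).map (fun c => (c, (3 : Int))))
        ++ (((pvCueMapA.get? "advanced").getD []).map (fun c => (c, (2 : Int))))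
        ++ (((pvCueMapA.get? "intermediate").getD []).map (fun c => (c, (1 : Int))))
        ++ (((pvCueMapA.get? "basic").getD []).map (fun c => (c, (0 : Int)))) := by
    decide
  rw [h]
  simp only [pvF, List.foldl_append, pvFoldSeg]
  by_cases hE : ((pvCueMapA.get? "expert").getD []).any f = true <;>
    by_cases hA : ((pvCueMapA.get? "advanced").getD []).any f = true <;>
      by_cases hI : ((pvCueMapA.get? "intermediate").getD []).any f = true <;>
        by_cases hB : ((pvCueMapA.get? "basic").getD []).any f = true <;>
          simp [hE, hA, hI, hB]

-- every cue in the table is a nonempty string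
theorem pvCuesNonempty : ∀ p ∈ pvCueRankB.items, p.1.toList ≠ [] := by decide

-- the seniority lookups of the two ports agree: A's default level and B's default rank
-- are the same level under the rank↔level correspondence
theorem pvSen (t : String) :
    (pvSenDefaultA.getD t "intermediate" = "basic" ∧ pvSenRankB.getD t 1 = 0) ∨
    (pvSenDefaultA.getD t "intermediate" = "intermediate" ∧ pvSenRankB.getD t 1 = 1) ∨
    (pvSenDefaultA.getD t "intermediate" = "advanced" ∧ pvSenRankB.getD t 1 = 2) ∨
    (pvSenDefaultA.getD t "intermediate" = "expert" ∧ pvSenRankB.getD t 1 = 3) := by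
  by_cases h1 : t = "junior"
  · subst h1; exact Or.inl ⟨by decide, by decide⟩
  by_cases h2 : t = "mid"
  · subst h2; exact Or.inr (Or.inl ⟨by decide, by decide⟩)
  by_cases h3 : t = "senior"
  · subst h3; exact Or.inr (Or.inr (Or.inl ⟨by decide, by decide⟩))
  by_cases h4 : t = "lead"
  · subst h4; exact Or.inr (Or.inr (Or.inr ⟨by decide, by decide⟩))
  by_cases h5 : t = "principal"
  · subst h5; exact Or.inr (Or.inr (Or.inr ⟨by decide, by decide⟩))
  · have f1 : ("junior" == t) = false := by simp; exact fun h => h1 h.symm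
    have f2 : ("mid" == t) = false := by simp; exact fun h => h2 h.symm
    have f3 : ("senior" == t) = false := by simp; exact fun h => h3 h.symm
    have f4 : ("lead" == t) = false := by simp; exact fun h => h4 h.symm
    have f5 : ("principal" == t) = false := by simp; exact fun h => h5 h.symm
    refine Or.inr (Or.inl ⟨?_, ?_⟩)
    · simp [pvSenDefaultA, PySem.Dict.getD, PySem.Dict.get?, List.find?, f1, f2, f3, f4, f5]
    · simp [pvSenRankB, PySem.Dict.getD, PySem.Dict.get?, List.find?, f1, f2, f3, f4, f5]

-- the two context slices agree: A clamps the end to len(jd_text) explicitly,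
-- B lets Python slicing clamp
theorem pvCtx (s : String) (L a e : Int) (hL : L = (s.toList.length : Int))
    (ha : 0 ≤ a) (he : 0 ≤ e) :
    PySem.Str.slice s (some a) (some (min L e)) = PySem.Str.slice s (some a) (some e) := by
  rw [← String.toList_inj, PySem.Str.toList_slice, PySem.Str.toList_slice,
    PySem.Chars.slice_eq_listSlice, PySem.Chars.slice_eq_listSlice]
  rcases le_total e L with h | h
  · rw [min_eq_right h]
  · rw [min_eq_left h, PySem.List.slice_toNat _ ha (by omega), PySem.List.slice_toNat _ ha he,
      List.take_of_length_le, List.take_of_length_le] <;> simp only [List.length_drop] <;> omega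

-- B's whole cue-detection (position sweep) equals A's ordered level chain
theorem pvSweep (ctx : String) :
    (PySem.List.pyRange 0 (PySem.Str.len ctx) 1).foldl
        (fun best i =>
          pvCueRankB.items.foldl
            (fun b p => if b < p.2 && PySem.Str.startswith (PySem.Str.slice ctx (some i) none) p.1
              then p.2 else b) best)
        (-1)
      = (if ((pvCueMapA.get? "expert").getD []).any (fun cue => PySem.Str.isIn cue ctx) then (3 : Int)
         else if ((pvCueMapA.get? "advanced").getD []).any (fun cue => PySem.Str.isIn cue ctx) then 2
         else if ((pvCueMapA.get? "intermediate").getD []).any (fun cue => PySem.Str.isIn cue ctx) then 1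
         else if ((pvCueMapA.get? "basic").getD []).any (fun cue => PySem.Str.isIn cue ctx) then 0
         else -1) := by
  rw [show (fun (best : Int) (i : Int) =>
        pvCueRankB.items.foldl
          (fun b p => if b < p.2 && PySem.Str.startswith (PySem.Str.slice ctx (some i) none) p.1
            then p.2 else b) best)
      = (fun (best : Int) (i : Int) =>
        pvF pvCueRankB.items
          (fun p => PySem.Str.startswith (PySem.Str.slice ctx (some i) none) p.1) best) from by
    funext b i; exact pvGuard _ _ _]
  rw [pvOuter _ _ _ _ (le_refl _)]
  rw [show pvF pvCueRankB.items
        (fun p => (PySem.List.pyRange 0 (PySem.Str.len ctx) 1).any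
          (fun i => PySem.Str.startswith (PySem.Str.slice ctx (some i) none) p.1)) (-1)
      = pvF pvCueRankB.items (fun p => PySem.Str.isIn p.1 ctx) (-1) from by
    unfold pvF
    apply PySem.List.foldl_congr_mem
    intro b p hp
    simp only [pvAnyPos p.1 ctx (pvCuesNonempty p hp)]]
  exact pvBest (fun cue => PySem.Str.isIn cue ctx)

-- ===== VERDICT (by name: the statement is the Claim_ definition above) =====
set_option maxHeartbeats 4000000 in
theorem estimate_skill_proficiency_py_spec : Claim_equal_estimate_skill_proficiency_py := by
  intro skill seniority jd_text nice _
  unfold Spec_estimate_skill_proficiency_py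
  simp only [estimate_skill_proficiency_py, estimate_skill_proficiency_py_alt]
  set pos := PySem.Str.find (PySem.Str.lower jd_text) (PySem.Str.lower skill) with hposdef
  set t := PySem.Str.lower seniority with htdef
  clear_value t
  by_cases hp : (0:Int) ≤ pos
  case neg =>
    rw [if_neg hp, if_neg hp]
    rcases pvSen t with ⟨h1, h2⟩ | ⟨h1, h2⟩ | ⟨h1, h2⟩ | ⟨h1, h2⟩ <;>
      rw [h1, h2] <;> cases nice <;> decide
  case pos =>
      rw [if_pos hp, if_pos hp]
      have hctx : PySem.Str.slice (PySem.Str.lower jd_text) (some (max 0 (pos - 150)))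
            (some (min (PySem.Str.len jd_text) (pos + PySem.Str.len (PySem.Str.lower skill) + 150)))
          = PySem.Str.slice (PySem.Str.lower jd_text) (some (max 0 (pos - 150)))
            (some (pos + PySem.Str.len (PySem.Str.lower skill) + 150)) := by
        apply pvCtx
        · rw [PySem.Str.len_eq, PySem.Str.toList_lower]
          simp [PySem.Chars.lower]
        · exact le_max_left _ _
        · have : (0:Int) ≤ PySem.Str.len (PySem.Str.lower skill) := by
            rw [PySem.Str.len_eq]; exact Int.natCast_nonneg _
          omega
      rw [hctx, pvSweep]
      set ctx := PySem.Str.slice (PySem.Str.lower jd_text) (some (max 0 (pos - 150)))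
        (some (pos + PySem.Str.len (PySem.Str.lower skill) + 150)) with hctxdef
      clear_value ctx
      simp only [pvFirstLevelA]
      by_cases hE : ((pvCueMapA.get? "expert").getD []).any (fun cue => PySem.Str.isIn cue ctx) = true <;>
        by_cases hA : ((pvCueMapA.get? "advanced").getD []).any (fun cue => PySem.Str.isIn cue ctx) = true <;>
          by_cases hI : ((pvCueMapA.get? "intermediate").getD []).any (fun cue => PySem.Str.isIn cue ctx) = true <;>
            by_cases hB : ((pvCueMapA.get? "basic").getD []).any (fun cue => PySem.Str.isIn cue ctx) = true <;>
              simp only [hE, hA, hI, hB, if_true, if_false, Bool.false_eq_true] <;>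
                rcases pvSen t with ⟨h1, h2⟩ | ⟨h1, h2⟩ | ⟨h1, h2⟩ | ⟨h1, h2⟩ <;>
                  rw [h1, h2] <;> cases nice <;> decide
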